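-- pv_equiv track=rewrite | github.com/Xam-N/Thesis_Project | Graphing.py | leftAndSearch
-- ===== SOURCE A (Python) =====
-- def leftAndSearch(wordTags,startIndex):
--     tempDict = {}
--     height = 0
--     andCounter = 0
--     skip = False
--     skipQuantity = 0
--     if startIndex == 0:
--       return tempDict
--     for uselessIndex,word in enumerate(reversed(wordTags[:startIndex-1])):
--         if skip == True:
--             if word[1] == "rbracket":
--                 skipQuantity = skipQuantity + 1
--                 continue
--             if word[1] == "lbracket" and skipQuantity == 0:
--                 skip = False
--                 continue
--             if word[1] == "lbracket" and skipQuantity != 0: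
--                 skipQuantity = skipQuantity - 1
--                 continue
--             continue
--         if word[1] == "bool":
--             if word[0] == "and":
--                 andCounter = andCounter + 1
--         if word[1] == "rbracket":
--             skip = True
--         if word[1] == "lbracket":
--             tempDict[height] = andCounter
--             height = height + 1
--             andCounter = 0
--     if andCounter != 0:
--         tempDict[height] = andCounter
--     return tempDict
-- ===== SOURCE B (Python) =====
-- def leftAndSearch(wordTags, startIndex):
--     # Two-pass decomposition: (1) filter the reversed prefix down to its
--     # depth-0 tokens using a single bracket-depth counter; (2) group/count.
--     if startIndex == 0:
--         return {}
--     depth = 0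
--     tops = []
--     for word in reversed(wordTags[:startIndex - 1]):
--         tag = word[1]
--         if depth > 0:
--             if tag == "rbracket":
--                 depth += 1
--             elif tag == "lbracket":
--                 depth -= 1
--         else:
--             if tag == "rbracket":
--                 depth = 1
--             elif tag == "lbracket":
--                 tops.append("|")
--             elif tag == "bool" and word[0] == "and":
--                 tops.append("and")
--     result = {}
--     height = 0
--     cnt = 0
--     for t in tops:
--         if t == "and":
--             cnt += 1
--         else:
--             result[height] = cnt
--             height += 1
--             cnt = 0
--     if cnt != 0:
--         result[height] = cnt
--     return result
-- ===== Notes on version B (the rewrite author's own statement) =====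
-- stated objective: alternative
-- what changed: A's single interleaved skip/skipQuantity state machine is replaced by two passes: a filter pass that keeps only bracket-depth-0 tokens (using one depth counter), then a grouping pass that counts 'and's per segment.
import Mathlib
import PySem

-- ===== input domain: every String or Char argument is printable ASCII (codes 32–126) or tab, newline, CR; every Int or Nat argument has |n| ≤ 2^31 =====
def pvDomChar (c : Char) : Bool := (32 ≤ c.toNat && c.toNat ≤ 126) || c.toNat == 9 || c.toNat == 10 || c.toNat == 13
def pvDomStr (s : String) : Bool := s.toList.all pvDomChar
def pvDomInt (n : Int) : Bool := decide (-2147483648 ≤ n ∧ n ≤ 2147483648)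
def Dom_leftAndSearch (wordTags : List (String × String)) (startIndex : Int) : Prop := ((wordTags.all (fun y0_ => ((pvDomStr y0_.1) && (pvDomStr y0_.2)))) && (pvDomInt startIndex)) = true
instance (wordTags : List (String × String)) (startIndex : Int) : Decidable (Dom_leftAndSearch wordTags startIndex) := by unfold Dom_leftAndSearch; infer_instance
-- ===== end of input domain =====

-- B replaces A's interleaved skip/skipQuantity state machine by a depth-filter pass followed by a grouping pass (objective: alternative decomposition).

-- ===== PORT A =====
-- state: (tempDict, height, andCounter, skip, skipQuantity)
def laStepA (st : PySem.Dict Int Int × Int × Int × Bool × Int) (word : String × String) :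
    PySem.Dict Int Int × Int × Int × Bool × Int :=
  let (tempDict, height, andCounter, skip, skipQuantity) := st
  if skip = true then
    if word.2 = "rbracket" then (tempDict, height, andCounter, skip, skipQuantity + 1)
    else if word.2 = "lbracket" ∧ skipQuantity = 0 then (tempDict, height, andCounter, false, skipQuantity)
    else if word.2 = "lbracket" ∧ skipQuantity ≠ 0 then (tempDict, height, andCounter, skip, skipQuantity - 1)
    else (tempDict, height, andCounter, skip, skipQuantity)
  else
    let andCounter := if word.2 = "bool" ∧ word.1 = "and" then andCounter + 1 else andCounter
    let skip := if word.2 = "rbracket" then true else skip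
    if word.2 = "lbracket" then (tempDict.insert height andCounter, height + 1, 0, skip, skipQuantity)
    else (tempDict, height, andCounter, skip, skipQuantity)

def leftAndSearch (wordTags : List (String × String)) (startIndex : Int) : List (Int × Int) :=
  if startIndex = 0 then [] else
  let xs := (PySem.List.slice wordTags none (some (startIndex - 1))).reverse
  let st := xs.foldl laStepA ((PySem.Dict.empty : PySem.Dict Int Int), 0, 0, false, 0)
  let (tempDict, height, andCounter, _, _) := st
  (if andCounter ≠ 0 then tempDict.insert height andCounter else tempDict).items

-- ===== PORT B =====
-- pass 1: keep only depth-0 tokens, as markers "and" / "|"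
def laStepB1 (st : Int × List String) (word : String × String) : Int × List String :=
  let (depth, tops) := st
  if depth > 0 then
    if word.2 = "rbracket" then (depth + 1, tops)
    else if word.2 = "lbracket" then (depth - 1, tops)
    else (depth, tops)
  else
    if word.2 = "rbracket" then ((1 : Int), tops)
    else if word.2 = "lbracket" then (depth, tops ++ ["|"])
    else if word.2 = "bool" ∧ word.1 = "and" then (depth, tops ++ ["and"])
    else (depth, tops)

-- pass 2: group the markers into per-height counts
def laStepB2 (st : PySem.Dict Int Int × Int × Int) (t : String) : PySem.Dict Int Int × Int × Int :=
  let (result, height, cnt) := st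
  if t = "and" then (result, height, cnt + 1)
  else (result.insert height cnt, height + 1, 0)

def leftAndSearch_alt (wordTags : List (String × String)) (startIndex : Int) : List (Int × Int) :=
  if startIndex = 0 then [] else
  let xs := (PySem.List.slice wordTags none (some (startIndex - 1))).reverse
  let tops := (xs.foldl laStepB1 ((0 : Int), [])).2
  let (result, height, cnt) := tops.foldl laStepB2 ((PySem.Dict.empty : PySem.Dict Int Int), 0, 0)
  (if cnt ≠ 0 then result.insert height cnt else result).items

-- ===== PRECONDITION & SPEC =====
def Spec_leftAndSearch (wordTags : List (String × String)) (startIndex : Int) (out : List (Int × Int)) : Prop := out = leftAndSearch_alt wordTags startIndex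
instance (wordTags : List (String × String)) (startIndex : Int) (out : List (Int × Int)) : Decidable (Spec_leftAndSearch wordTags startIndex out) := by unfold Spec_leftAndSearch; infer_instance

-- ===== CLAIM (what is proved, stated in full; the proofs are below) =====
def Claim_equal_leftAndSearch : Prop := ∀ (wordTags : List (String × String)) (startIndex : Int), Dom_leftAndSearch wordTags startIndex → Spec_leftAndSearch wordTags startIndex (leftAndSearch wordTags startIndex)

-- ===== LEMMAS AND PROOFS =====

-- functional form of B's first pass: the depth-0 markers of l when starting at bracket depth k
def laFilt : Nat → List (String × String) → List String
  | _, [] => []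
  | 0, w :: ts =>
      if w.2 = "rbracket" then laFilt 1 ts
      else if w.2 = "lbracket" then "|" :: laFilt 0 ts
      else if w.2 = "bool" ∧ w.1 = "and" then "and" :: laFilt 0 ts
      else laFilt 0 ts
  | (k+1), w :: ts =>
      if w.2 = "rbracket" then laFilt (k+2) ts
      else if w.2 = "lbracket" then laFilt k ts
      else laFilt (k+1) ts

-- A's skip state encoded by a bracket depth k
def laSkipSt : Nat → Bool × Int
  | 0 => (false, 0)
  | (k+1) => (true, (k : Int))

theorem laB1_foldl (l : List (String × String)) :
    ∀ (k : Nat) (acc : List String),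
      l.foldl laStepB1 ((k : Int), acc) = (((l.foldl laStepB1 ((k : Int), acc)).1), acc ++ laFilt k l) ∧
      ∃ k' : Nat, (l.foldl laStepB1 ((k : Int), acc)).1 = (k' : Int) := by
  induction l with
  | nil => intro k acc; simp [laFilt]
  | cons w ts ih =>
    intro k acc
    have step : ∀ (m : Nat) (ac : List String) (m' : Nat) (ac' : List String),
        laStepB1 ((m : Int), ac) w = ((m' : Int), ac') →
        ac' ++ laFilt m' ts = ac ++ laFilt m (w :: ts) →
        (w :: ts).foldl laStepB1 ((m : Int), ac) =
          (((w :: ts).foldl laStepB1 ((m : Int), ac)).1, ac ++ laFilt m (w :: ts)) ∧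
        ∃ k' : Nat, ((w :: ts).foldl laStepB1 ((m : Int), ac)).1 = (k' : Int) := by
      intro m ac m' ac' h1 h2
      rw [List.foldl_cons, h1, ← h2]
      exact ih m' ac'
    by_cases hr : w.2 = "rbracket"
    · cases k with
      | zero =>
        refine step 0 acc 1 acc ?_ ?_
        · simp [laStepB1, hr]
        · simp [laFilt, hr]
      | succ k =>
        refine step (k+1) acc (k+2) acc ?_ ?_
        · simp [laStepB1, hr]
          push_cast; ring
        · simp [laFilt, hr]
    · by_cases hl : w.2 = "lbracket"
      · cases k with
        | zero =>
          refine step 0 acc 0 (acc ++ ["|"]) ?_ ?_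
          · simp [laStepB1, hr, hl]
          · simp [laFilt, hr, hl]
        | succ k =>
          refine step (k+1) acc k acc ?_ ?_
          · simp [laStepB1, hl]
          · simp [laFilt, hl]
      · cases k with
        | zero =>
          by_cases hb : w.2 = "bool" ∧ w.1 = "and"
          · refine step 0 acc 0 (acc ++ ["and"]) ?_ ?_
            · simp [laStepB1, hr, hl, hb]
            · simp [laFilt, hr, hl, hb]
          · refine step 0 acc 0 acc ?_ ?_
            · simp [laStepB1, hr, hl, hb]
            · simp [laFilt, hr, hl, hb]
        | succ k =>
          refine step (k+1) acc (k+1) acc ?_ ?_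
          · simp [laStepB1, hr, hl]
          · simp [laFilt, hr, hl]

-- core invariant: A's interleaved fold equals B's pass-2 fold over the filtered markers
theorem laA_eq_filt (l : List (String × String)) :
    ∀ (k : Nat) (d : PySem.Dict Int Int) (h c : Int),
      ∃ k' : Nat,
        l.foldl laStepA (d, h, c, laSkipSt k) =
          (((laFilt k l).foldl laStepB2 (d, h, c)).1,
           ((laFilt k l).foldl laStepB2 (d, h, c)).2.1,
           ((laFilt k l).foldl laStepB2 (d, h, c)).2.2,
           laSkipSt k') := by
  induction l with
  | nil => intro k d h c; exact ⟨k, rfl⟩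
  | cons w ts ih =>
    intro k d h c
    have step : ∀ (m : Nat) (st : PySem.Dict Int Int × Int × Int) (m' : Nat)
        (st' : PySem.Dict Int Int × Int × Int),
        laStepA (st.1, st.2.1, st.2.2, laSkipSt m) w = (st'.1, st'.2.1, st'.2.2, laSkipSt m') →
        (laFilt m' ts).foldl laStepB2 st' = (laFilt m (w :: ts)).foldl laStepB2 st →
        ∃ k', (w :: ts).foldl laStepA (st.1, st.2.1, st.2.2, laSkipSt m) =
          (((laFilt m (w :: ts)).foldl laStepB2 st).1,
           ((laFilt m (w :: ts)).foldl laStepB2 st).2.1,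
           ((laFilt m (w :: ts)).foldl laStepB2 st).2.2,
           laSkipSt k') := by
      intro m st m' st' h1 h2
      rw [List.foldl_cons, h1, ← h2]
      exact ih m' st'.1 st'.2.1 st'.2.2
    by_cases hr : w.2 = "rbracket"
    · cases k with
      | zero =>
        refine step 0 (d, h, c) 1 (d, h, c) ?_ ?_
        · simp [laStepA, laSkipSt, hr]
        · simp [laFilt, hr]
      | succ k =>
        refine step (k+1) (d, h, c) (k+2) (d, h, c) ?_ ?_
        · simp [laStepA, laSkipSt, hr]
        · simp [laFilt, hr]
    · by_cases hl : w.2 = "lbracket"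
      · cases k with
        | zero =>
          refine step 0 (d, h, c) 0 (d.insert h c, h + 1, 0) ?_ ?_
          · simp [laStepA, laSkipSt, hr, hl]
          · simp [laFilt, laStepB2, hr, hl]
        | succ k =>
          cases k with
          | zero =>
            refine step 1 (d, h, c) 0 (d, h, c) ?_ ?_
            · simp [laStepA, laSkipSt, hr, hl]
            · simp [laFilt, hr, hl]
          | succ k =>
            refine step (k+2) (d, h, c) (k+1) (d, h, c) ?_ ?_
            · have hk : ¬((k : Int) + 1 = 0) := by omega
              simp [laStepA, laSkipSt, hl, hk]
            · simp [laFilt, hl]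
      · cases k with
        | zero =>
          by_cases hb : w.2 = "bool" ∧ w.1 = "and"
          · refine step 0 (d, h, c) 0 (d, h, c + 1) ?_ ?_
            · simp [laStepA, laSkipSt, hr, hl, hb]
            · simp [laFilt, laStepB2, hr, hl, hb]
          · refine step 0 (d, h, c) 0 (d, h, c) ?_ ?_
            · simp [laStepA, laSkipSt, hr, hl, hb]
            · simp [laFilt, hr, hl, hb]
        | succ k =>
          refine step (k+1) (d, h, c) (k+1) (d, h, c) ?_ ?_
          · simp [laStepA, laSkipSt, hr, hl]
          · simp [laFilt, hr, hl]

-- ===== VERDICT (by name: the statement is the Claim_ definition above) =====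
theorem leftAndSearch_spec : Claim_equal_leftAndSearch := by
  intro wordTags startIndex _
  unfold Spec_leftAndSearch leftAndSearch leftAndSearch_alt
  by_cases hz : startIndex = 0
  · simp [hz]
  · simp only [if_neg hz]
    set xs := (PySem.List.slice wordTags none (some (startIndex - 1))).reverse with hxs
    have htops : (xs.foldl laStepB1 ((0 : Int), [])).2 = laFilt 0 xs := by
      have h := (laB1_foldl xs 0 []).1
      simp only [Nat.cast_zero, List.nil_append] at h
      rw [h]
    obtain ⟨k', hA⟩ := laA_eq_filt xs 0 PySem.Dict.empty 0 0
    rw [show ((PySem.Dict.empty : PySem.Dict Int Int), (0 : Int), (0 : Int), false, (0 : Int)) =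
          ((PySem.Dict.empty : PySem.Dict Int Int), (0 : Int), (0 : Int), laSkipSt 0) from rfl,
        hA, htops]
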